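-- pv_equiv track=rewrite | github.com/PiKaChu-R/code-learn | program/zcy-arithmetic/string/removeKZeros.py | removeKZeros
-- ===== SOURCE A (Python) =====
-- def removeKZeros(s, k):
--     if not s or k < 1:
--         return s
--
--     count = 0
--     start = -1
--     i = 0
--     while i < len(s):
--         if s[i] == '0':
--             if start == -1:
--                 start = i
--             count += 1
--         else:
--             if count == k:
--                 s = s[:start]+s[start+count:]
--                 i -= count
--             count = 0
--             start = -1
--         i += 1
--     if count == k:
--         s = s[:start]+s[start+count:]
--
--     return s
-- ===== SOURCE B (Python) =====
-- def removeKZeros(s, k):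
--     if not s or k < 1:
--         return s
--     out = []
--     run = 0
--     for ch in s:
--         if ch == '0':
--             run += 1
--         else:
--             if run != k:
--                 out.append('0' * run)
--             run = 0
--             out.append(ch)
--     if run != k:
--         out.append('0' * run)
--     return ''.join(out)
-- ===== Notes on version B (the rewrite author's own statement) =====
-- stated objective: faster
-- what changed: A rescans the string with a while loop and repeatedly splices out k-zero runs via slicing (quadratic in the worst case); B makes a single left-to-right pass that accumulates zero-run lengths, drops runs of length exactly k, and joins the kept chunks.
import Mathlib
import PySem

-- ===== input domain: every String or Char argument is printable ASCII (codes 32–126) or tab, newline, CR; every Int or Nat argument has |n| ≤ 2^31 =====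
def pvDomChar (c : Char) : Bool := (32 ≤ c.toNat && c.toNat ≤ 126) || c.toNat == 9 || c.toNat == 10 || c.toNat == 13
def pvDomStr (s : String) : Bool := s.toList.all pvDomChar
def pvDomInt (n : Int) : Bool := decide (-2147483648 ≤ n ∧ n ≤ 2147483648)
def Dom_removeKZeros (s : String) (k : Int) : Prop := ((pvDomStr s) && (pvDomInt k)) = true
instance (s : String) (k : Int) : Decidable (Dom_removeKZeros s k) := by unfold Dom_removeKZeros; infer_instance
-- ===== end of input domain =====

set_option maxRecDepth 10000


-- B replaces A's rescan-and-splice while loop by a single left-to-right pass that groups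
-- zero runs, drops the runs of length exactly k and joins the kept chunks (alternative/faster).

-- ===== PORT A =====
-- literal port of A's while loop, state (s, count, start, i); start = -1 is Python's
-- sentinel.  fuel only bounds the number of iterations (the loop always terminates and
-- the initial fuel 2*len+1 is never exhausted: each iteration either advances i or
-- shortens s, see goA_eq_aux below); it is a totality guard, not part of the algorithm.
def goA (k : Int) (fuel : Nat) (s : List Char) (count : Nat) (start : Int) (i : Nat) : List Char :=
  match fuel with
  | 0 => s
  | fuel + 1 =>
    if h : i < s.length then
      if s[i] = '0' then
        goA k fuel s (count + 1) (if start = -1 then (i : Int) else start) (i + 1)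
      else
        if (count : Int) = k then
          -- s = s[:start] + s[start+count:]; i -= count; then count = 0, start = -1, i += 1
          goA k fuel (PySem.List.slice s none (some start) ++ PySem.List.slice s (some (start + count)) none)
            0 (-1) (i - count + 1)
        else
          goA k fuel s 0 (-1) (i + 1)
    else
      if (count : Int) = k then
        PySem.List.slice s none (some start) ++ PySem.List.slice s (some (start + count)) none
      else s

def removeKZeros (s : String) (k : Int) : String :=
  if s.toList = [] ∨ k < 1 then s
  else String.ofList (goA k (2 * s.toList.length + 1) s.toList 0 (-1) 0)

-- ===== PORT B =====
-- one step of B's for-loop; state = (out : list of chunks, run : current zero-run length)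
def stepB (k : Int) (st : List (List Char) × Nat) (c : Char) : List (List Char) × Nat :=
  if c = '0' then (st.1, st.2 + 1)
  else ((if (st.2 : Int) = k then st.1 else st.1 ++ [List.replicate st.2 '0']) ++ [[c]], 0)

def removeKZeros_alt (s : String) (k : Int) : String :=
  if s.toList = [] ∨ k < 1 then s
  else
    let p := s.toList.foldl (stepB k) ([], 0)
    let out := if (p.2 : Int) = k then p.1 else p.1 ++ [List.replicate p.2 '0']
    String.ofList out.flatten

-- ===== PRECONDITION & SPEC =====
def Spec_removeKZeros (s : String) (k : Int) (out : String) : Prop := out = removeKZeros_alt s k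
instance (s : String) (k : Int) (out : String) : Decidable (Spec_removeKZeros s k out) := by unfold Spec_removeKZeros; infer_instance

-- ===== CLAIM (what is proved, stated in full; the proofs are below) =====
def Claim_equal_removeKZeros : Prop := ∀ (s : String) (k : Int), Dom_removeKZeros s k → Spec_removeKZeros s k (removeKZeros s k)

-- ===== LEMMAS AND PROOFS =====

-- reference function: process the tail with a pending zero-run of length run
def refGo (k : Int) : List Char → Nat → List Char
  | [], run => if (run : Int) = k then [] else List.replicate run '0'
  | c :: t, run =>
      if c = '0' then refGo k t (run + 1)
      else (if (run : Int) = k then [] else List.replicate run '0') ++ c :: refGo k t 0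

-- B's final flush + join
def postB (k : Int) (p : List (List Char) × Nat) : List Char :=
  (if (p.2 : Int) = k then p.1 else p.1 ++ [List.replicate p.2 '0']).flatten

lemma foldB_eq (k : Int) (l : List Char) (out : List (List Char)) (run : Nat) :
    postB k (l.foldl (stepB k) (out, run)) = out.flatten ++ refGo k l run := by
  induction l generalizing out run with
  | nil =>
      simp only [List.foldl_nil, postB, refGo]
      split_ifs <;> simp
  | cons c t ih =>
      simp only [List.foldl_cons, stepB, refGo]
      by_cases hc : c = '0'
      · simp [hc, ih]
      · simp only [if_neg hc]
        rw [ih]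
        split_ifs <;> simp

lemma take_len_add_one (a t : List Char) (c : Char) :
    (a ++ c :: t).take (a.length + 1) = a ++ [c] := by
  simp [List.take_append]

lemma drop_len_add_one (a t : List Char) (c : Char) :
    (a ++ c :: t).drop (a.length + 1) = t := by
  simp [List.drop_append]

lemma zeros_take (s : List Char) (st count i : Nat) (hst : st + count = i)
    (hle : i ≤ s.length) (hz : ∀ j, st ≤ j → j < i → s[j]? = some '0') :
    s.take i = s.take st ++ List.replicate count '0' := by
  induction count generalizing i with
  | zero => simp at hst; simp [← hst]
  | succ n ih =>
      have h1 : s.take (st + n) = s.take st ++ List.replicate n '0' :=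
        ih (st + n) rfl (by omega) (fun j hj1 hj2 => hz j hj1 (by omega))
      have hlt : st + n < s.length := by omega
      have h2 : s.take i = s.take (st + n) ++ [s[st + n]] := by
        rw [← hst, Nat.add_succ, List.take_add_one, List.getElem?_eq_getElem hlt]
        rfl
      have h3 : s[st + n] = '0' := by
        have := hz (st + n) (by omega) (by omega)
        rw [List.getElem?_eq_getElem hlt] at this
        exact Option.some.inj this
      rw [h2, h1, h3, List.replicate_succ']
      simp

-- invariant of A's loop: when a run is open (start ≠ -1), start+count = i and
-- s[start..i) are all '0'; when start = -1, count = 0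
def InvA (s : List Char) (count : Nat) (start : Int) (i : Nat) : Prop :=
  i ≤ s.length ∧
    ((start = -1 ∧ count = 0) ∨
      (0 ≤ start ∧ start.toNat + count = i ∧
        ∀ j, start.toNat ≤ j → j < i → s[j]? = some '0'))

lemma goA_eq_aux (k : Int) (hk : 1 ≤ k) :
    ∀ (fuel : Nat) (s : List Char) (count : Nat) (start : Int) (i : Nat),
      InvA s count start i → 2 * s.length - i < fuel →
      goA k fuel s count start i
        = s.take (if start = -1 then i else start.toNat) ++ refGo k (s.drop i) count := by
  intro fuel
  induction fuel with
  | zero => intro s count start i hinv hlt; omega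
  | succ n ih =>
      intro s count start i hinv hlt
      obtain ⟨hle, hinv⟩ := hinv
      by_cases h : i < s.length
      · by_cases hch : s[i] = '0'
        · -- zero character
          have hdrop : s.drop i = s[i] :: s.drop (i + 1) := List.drop_eq_getElem_cons h
          rcases hinv with ⟨hs1, hc0⟩ | ⟨hs0, h3, hz⟩
          · rw [goA]
            simp only [dif_pos h, if_pos hch, if_pos hs1]
            have hinvN : InvA s (count + 1) (i : Int) (i + 1) := by
              refine ⟨by omega, Or.inr ⟨by omega, by simp [hc0], ?_⟩⟩
              intro j hj1 hj2
              simp only [Int.toNat_natCast] at hj1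
              have : j = i := by omega
              subst this; simp [List.getElem?_eq_getElem h, hch]
            rw [ih s (count + 1) (i : Int) (i + 1) hinvN (by omega)]
            have hne : ¬((i : Int) = -1) := by omega
            rw [if_neg hne, hdrop, hch, hc0]
            simp [refGo]
          · have hne : ¬(start = -1) := by omega
            rw [goA]
            simp only [dif_pos h, if_pos hch, if_neg hne]
            have hinvN : InvA s (count + 1) start (i + 1) := by
              refine ⟨by omega, Or.inr ⟨hs0, by omega, ?_⟩⟩
              intro j hj1 hj2
              rcases Nat.lt_or_ge j i with hj | hj
              · exact hz j hj1 hj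
              · have : j = i := by omega
                subst this; simp [List.getElem?_eq_getElem h, hch]
            rw [ih s (count + 1) start (i + 1) hinvN (by omega)]
            rw [if_neg hne, hdrop, hch]
            simp [refGo]
        · by_cases hc : (count : Int) = k
          · -- removal branch
            rcases hinv with ⟨hs1, hc0⟩ | ⟨hs0, h3, hz⟩
            · omega
            · rw [goA]
              simp only [dif_pos h, if_neg hch, if_pos hc]
              set st := start.toNat with hst
              have hstart : start = (st : Int) := by omega
              have hcast : (st : Int) + (count : Int) = ((st + count : Nat) : Int) := by
                push_cast; ring
              have hS : PySem.List.slice s none (some start)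
                    ++ PySem.List.slice s (some (start + count)) none
                  = s.take st ++ s.drop (st + count) := by
                rw [hstart, hcast, PySem.List.slice_to_natCast, PySem.List.slice_from_natCast]
              rw [hS]
              have hlen' : (s.take st ++ s.drop (st + count)).length = s.length - count := by
                simp only [List.length_append, List.length_take, List.length_drop]
                omega
              rw [ih _ _ _ _ ⟨by rw [hlen']; omega, Or.inl ⟨rfl, rfl⟩⟩ (by rw [hlen']; omega)]
              have hdrop : s.drop i = s[i] :: s.drop (i + 1) := List.drop_eq_getElem_cons h
              have hlentake : (s.take st).length = st := by
                simp only [List.length_take]; omega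
              have hsplit : s.take st ++ s.drop (st + count) = s.take st ++ s[i] :: s.drop (i + 1) := by
                rw [h3, hdrop]
              have hidx : i - count + 1 = st + 1 := by omega
              rw [hsplit, hidx]
              have htake : (s.take st ++ s[i] :: s.drop (i + 1)).take (st + 1)
                  = s.take st ++ [s[i]] := by
                have := take_len_add_one (s.take st) (s.drop (i + 1)) s[i]
                rwa [hlentake] at this
              have hdrop2 : (s.take st ++ s[i] :: s.drop (i + 1)).drop (st + 1)
                  = s.drop (i + 1) := by
                have := drop_len_add_one (s.take st) (s.drop (i + 1)) s[i]
                rwa [hlentake] at this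
              rw [if_pos rfl, if_neg (by omega : ¬(start = -1)), htake, hdrop2, hdrop]
              simp [refGo, hch, hc]
          · -- non-zero character, count ≠ k
            have hdrop : s.drop i = s[i] :: s.drop (i + 1) := List.drop_eq_getElem_cons h
            have htake : s.take (i + 1) = s.take i ++ [s[i]] := by
              rw [List.take_add_one, List.getElem?_eq_getElem h]
              rfl
            rw [goA]
            simp only [dif_pos h, if_neg hch, if_neg hc]
            rw [ih s 0 (-1) (i + 1) ⟨by omega, Or.inl ⟨rfl, rfl⟩⟩ (by omega)]
            rcases hinv with ⟨hs1, hc0⟩ | ⟨hs0, h3, hz⟩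
            · subst hc0
              rw [if_pos rfl, if_pos hs1]
              rw [hdrop]
              rw [refGo, if_neg hch, if_neg hc]
              rw [htake, List.append_assoc, List.singleton_append]
              rfl
            · have hzt := zeros_take s start.toNat count i h3 (by omega) hz
              rw [if_pos rfl, if_neg (by omega : ¬(start = -1))]
              rw [htake, hzt, hdrop]
              simp only [refGo, if_neg hch, if_neg hc]
              simp
      · -- loop exit: i = s.length
        have hlen : i = s.length := by omega
        by_cases hc : (count : Int) = k
        · rcases hinv with ⟨hs1, hc0⟩ | ⟨hs0, h3, hz⟩
          · omega
          · rw [goA]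
            simp only [dif_neg h, if_pos hc]
            set st := start.toNat with hst
            have hstart : start = (st : Int) := by omega
            have hcast : (st : Int) + (count : Int) = ((st + count : Nat) : Int) := by
              push_cast; ring
            rw [hstart, hcast, PySem.List.slice_to_natCast, PySem.List.slice_from_natCast]
            rw [if_neg (by omega : ¬((st : Int) = -1))]
            rw [h3, hlen]
            simp [refGo, hc]
        · rcases hinv with ⟨hs1, hc0⟩ | ⟨hs0, h3, hz⟩
          · subst hc0
            rw [goA]
            simp only [dif_neg h, if_neg hc]
            rw [if_pos hs1, hlen]
            simp [refGo]
          · rw [goA]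
            simp only [dif_neg h, if_neg hc]
            have hzt := zeros_take s start.toNat count i h3 (by omega) hz
            rw [if_neg (by omega : ¬(start = -1))]
            rw [hlen] at hzt ⊢
            rw [List.drop_length]
            simp only [refGo, if_neg hc]
            rw [← hzt, List.take_length]

-- ===== VERDICT (by name: the statement is the Claim_ definition above) =====
theorem removeKZeros_spec : Claim_equal_removeKZeros := by
  intro s k _
  unfold Spec_removeKZeros removeKZeros removeKZeros_alt
  by_cases h : s.toList = [] ∨ k < 1
  · rw [if_pos h, if_pos h]
  · rw [if_neg h, if_neg h]
    have hk : 1 ≤ k := by have := (not_or.mp h).2; omega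
    rw [goA_eq_aux k hk _ _ _ _ _ ⟨Nat.zero_le _, Or.inl ⟨rfl, rfl⟩⟩ (by omega)]
    have hb := foldB_eq k s.toList [] 0
    simp only [postB] at hb
    simp only [List.drop_zero]
    rw [hb]
    simp
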